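-- pv_equiv track=rewrite | github.com/kickertw/Aoc2018 | day2.py | get_mini_checksum
-- ===== SOURCE A (Python) =====
-- def get_mini_checksum(letter_freq):
--     a = 0
--     b = 0
--     for key, value in letter_freq.items():
--         if a == 1 and b == 1:
--             return a, b
--         if value == 2:
--             a = 1
--         if value == 3:
--             b = 1
--     return a, b
-- ===== SOURCE B (Python) =====
-- def get_mini_checksum(letter_freq):
--     vals = list(letter_freq.values())
--     return (min(1, vals.count(2)), min(1, vals.count(3)))
-- ===== Notes on version B (the rewrite author's own statement) =====
-- stated objective: simpler
-- what changed: Replaces the fused flag-setting early-exit loop with an arithmetical formulation: two independent counting passes (vals.count(2), vals.count(3)) whose results are clamped with min(1, .), so no flags or control flow are maintained at all.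
import Mathlib
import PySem

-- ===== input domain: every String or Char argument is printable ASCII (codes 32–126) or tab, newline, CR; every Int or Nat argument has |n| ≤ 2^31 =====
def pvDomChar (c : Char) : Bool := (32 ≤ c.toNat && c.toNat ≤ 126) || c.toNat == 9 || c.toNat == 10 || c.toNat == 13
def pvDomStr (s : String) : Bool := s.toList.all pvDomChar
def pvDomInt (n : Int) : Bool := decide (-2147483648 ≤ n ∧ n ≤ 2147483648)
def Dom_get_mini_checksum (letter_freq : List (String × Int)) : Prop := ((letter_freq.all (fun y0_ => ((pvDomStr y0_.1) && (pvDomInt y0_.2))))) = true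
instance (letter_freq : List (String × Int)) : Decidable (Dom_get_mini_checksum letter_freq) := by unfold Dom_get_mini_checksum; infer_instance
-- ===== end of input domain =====

-- ===== PORT A =====
-- B replaces the flag-setting early-exit loop with two clamped counting passes; same return value.
def pvGoA : List (String × Int) → Int → Int → Int × Int
  | [], a, b => (a, b)
  | (_, v) :: t, a, b =>
    if a = 1 ∧ b = 1 then (a, b)
    else pvGoA t (if v = 2 then 1 else a) (if v = 3 then 1 else b)

def get_mini_checksum (letter_freq : List (String × Int)) : Int × Int :=
  pvGoA letter_freq 0 0

-- ===== PORT B =====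
def get_mini_checksum_alt (letter_freq : List (String × Int)) : Int × Int :=
  let vals : List Int := letter_freq.map Prod.snd
  (min 1 (PySem.List.count vals 2 : Int), min 1 (PySem.List.count vals 3 : Int))

-- ===== PRECONDITION & SPEC =====
def Spec_get_mini_checksum (letter_freq : List (String × Int)) (out : Int × Int) : Prop := out = get_mini_checksum_alt letter_freq
instance (letter_freq : List (String × Int)) (out : Int × Int) : Decidable (Spec_get_mini_checksum letter_freq out) := by unfold Spec_get_mini_checksum; infer_instance

-- ===== CLAIM =====
def Claim_equal_get_mini_checksum : Prop := ∀ (letter_freq : List (String × Int)), Dom_get_mini_checksum letter_freq → Spec_get_mini_checksum letter_freq (get_mini_checksum letter_freq)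

-- ===== LEMMAS AND PROOFS =====
theorem pvGoA_char (t : List (String × Int)) : ∀ (a b : Int), (a = 0 ∨ a = 1) → (b = 0 ∨ b = 1) →
    pvGoA t a b = ((if a = 1 ∨ (2 : Int) ∈ t.map Prod.snd then 1 else 0),
                   (if b = 1 ∨ (3 : Int) ∈ t.map Prod.snd then 1 else 0)) := by
  induction t with
  | nil =>
    intro a b ha hb
    rcases ha with h | h <;> rcases hb with h' | h' <;> simp [pvGoA, h, h']
  | cons p t ih =>
    intro a b ha hb
    by_cases hab : a = 1 ∧ b = 1
    · simp [pvGoA, hab.1, hab.2]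
    · rw [pvGoA]
      rw [if_neg hab]
      have ha2 : ((if p.2 = 2 then (1 : Int) else a) = 1) ↔ (a = 1 ∨ p.2 = 2) := by
        rcases ha with h | h <;> by_cases h2 : p.2 = 2 <;> simp [h, h2]
      have hb3 : ((if p.2 = 3 then (1 : Int) else b) = 1) ↔ (b = 1 ∨ p.2 = 3) := by
        rcases hb with h | h <;> by_cases h3 : p.2 = 3 <;> simp [h, h3]
      rw [ih _ _ (by rcases ha with h|h <;> [skip; simp [h]] <;> by_cases h2 : p.2 = 2 <;> simp [h, h2])
                 (by rcases hb with h|h <;> [skip; simp [h]] <;> by_cases h3 : p.2 = 3 <;> simp [h, h3])]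
      refine congrArg₂ Prod.mk (if_congr ?_ rfl rfl) (if_congr ?_ rfl rfl) <;>
        simp only [ha2, hb3, List.map_cons, List.mem_cons, or_assoc] <;>
        constructor <;> intro hx <;> rcases hx with hx | hx | hx <;> simp [hx]

theorem pv_min_count (vals : List Int) (v : Int) :
    min 1 (PySem.List.count vals v : Int) = if v ∈ vals then 1 else 0 := by
  rw [PySem.List.count_eq]
  by_cases h : v ∈ vals
  · have : 1 ≤ vals.count v := List.one_le_count_iff.mpr h
    simp only [h, if_true]
    omega
  · simp [h, List.count_eq_zero_of_not_mem h]

-- ===== VERDICT =====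
theorem get_mini_checksum_spec : Claim_equal_get_mini_checksum := by
  intro lf _
  unfold Spec_get_mini_checksum get_mini_checksum get_mini_checksum_alt
  rw [pvGoA_char lf 0 0 (Or.inl rfl) (Or.inl rfl)]
  simp only [pv_min_count]
  have h0 : ((0:Int) = 1) = False := by norm_num
  simp only [h0, false_or]
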